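-- pv_equiv track=rewrite | github.com/zhu-jl18/novel-proofer | novel_proofer/runner.py | _strip_leading_blank_lines
-- ===== SOURCE A (Python) =====
-- def _normalize_newlines(text: str) -> str:
--     if "\r" not in text:
--         return text
--     return text.replace("\r\n", "\n").replace("\r", "\n")
--
-- def _strip_leading_blank_lines(text: str) -> str:
--     text = _normalize_newlines(text)
--     i = 0
--     while True:
--         j = text.find("\n", i)
--         if j < 0:
--             return text
--         line = text[i:j]
--         if line.strip() != "":
--             return text[i:]
--         i = j + 1
-- ===== SOURCE B (Python) =====
-- def _normalize_newlines(text: str) -> str: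
--     if "\r" not in text:
--         return text
--     return text.replace("\r\n", "\n").replace("\r", "\n")
--
-- def _strip_leading_blank_lines(text: str) -> str:
--     text = _normalize_newlines(text)
--     parts = text.split("\n")
--     for k in range(len(parts) - 1):
--         if parts[k].strip():
--             return "\n".join(parts[k:])
--     return text
-- ===== Notes on version B (the rewrite author's own statement) =====
-- stated objective: simpler
-- what changed: Replaces A's incremental find/slice index walk over the raw string with splitting the normalized text into newline-separated parts, scanning the non-final parts for the first non-blank one, and rejoining from there; the whole-text return when every non-final part is blank is kept.
import Mathlib
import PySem

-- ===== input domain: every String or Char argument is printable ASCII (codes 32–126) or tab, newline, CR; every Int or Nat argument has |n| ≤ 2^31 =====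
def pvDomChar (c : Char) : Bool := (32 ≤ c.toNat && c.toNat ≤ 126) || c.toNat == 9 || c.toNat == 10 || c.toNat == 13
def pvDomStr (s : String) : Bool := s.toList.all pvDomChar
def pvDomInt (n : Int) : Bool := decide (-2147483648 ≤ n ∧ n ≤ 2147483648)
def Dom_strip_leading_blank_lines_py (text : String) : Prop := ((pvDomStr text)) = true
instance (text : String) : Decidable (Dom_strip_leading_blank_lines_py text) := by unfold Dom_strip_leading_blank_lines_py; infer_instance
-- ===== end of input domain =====

-- B replaces A's incremental find/slice index walk over the string by splitting the
-- normalized text into newline-separated parts, scanning the non-final parts for the first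
-- non-blank one, and rejoining from there (same return value; chosen for simplicity).

-- ===== PORT A =====
-- helper _normalize_newlines (shared by both Pythons, module-level)
def normalize_newlines_py (text : String) : String :=
  if PySem.Str.isIn "\r" text = false then text
  else PySem.Str.replace (PySem.Str.replace text "\r\n" "\n") "\r" "\n"

-- A's `while True` walk over the normalized text; `fuel` only makes the loop total
-- (it is called with enough fuel that the 0 case is never reached).
def pyA_loop (t : List Char) : Nat → Nat → List Char
  | _, 0 => t
  | i, fuel + 1 =>
    let j := PySem.Chars.findFrom t ['\n'] (i : Int)
    if j < 0 then t
    else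
      let line := PySem.Chars.slice t (some (i : Int)) (some j)
      if ¬ PySem.Chars.strip line = [] then PySem.Chars.slice t (some (i : Int)) none
      else pyA_loop t (j.toNat + 1) fuel

def strip_leading_blank_lines_py (text : String) : String :=
  let t := (normalize_newlines_py text).toList
  String.ofList (pyA_loop t 0 (t.length + 1))

-- ===== PORT B =====
-- Source B's `for k in range(len(parts) - 1)` scan: the first non-blank part among the
-- non-final parts, together with everything after it; none when the loop falls through
def pyB_find : List (List Char) → Option (List (List Char))
  | [] => none
  | [_] => none
  | p :: q :: ps => if PySem.Chars.strip p = [] then pyB_find (q :: ps) else some (p :: q :: ps)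

def strip_leading_blank_lines_py_alt (text : String) : String :=
  let t := (normalize_newlines_py text).toList
  let parts := PySem.Chars.splitOn t ['\n']
  match pyB_find parts with
  | some rest => String.ofList (PySem.Chars.join ['\n'] rest)
  | none => String.ofList t

-- ===== PRECONDITION & SPEC =====
def Spec_strip_leading_blank_lines_py (text : String) (out : String) : Prop :=
  out = strip_leading_blank_lines_py_alt text
instance (text : String) (out : String) : Decidable (Spec_strip_leading_blank_lines_py text out) := by
  unfold Spec_strip_leading_blank_lines_py; infer_instance

-- ===== CLAIM (what is proved, stated in full; the proofs are below) =====
def Claim_equal_strip_leading_blank_lines_py : Prop := ∀ (text : String), Dom_strip_leading_blank_lines_py text → Spec_strip_leading_blank_lines_py text (strip_leading_blank_lines_py text)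

-- ===== LEMMAS AND PROOFS =====

-- proof-side splitter: text.split('\n') on a list of chars, structurally
def pvSplitNL : List Char → List (List Char)
  | [] => [[]]
  | '\n' :: r => [] :: pvSplitNL r
  | c :: r =>
    match pvSplitNL r with
    | [] => [[c]]
    | l :: ls => (c :: l) :: ls

-- cons-onto-head helper used to state the splitOn.go invariant
def pvConsH (p : List Char) : List (List Char) → List (List Char)
  | [] => [p]
  | x :: xs => (p ++ x) :: xs

lemma pvSplitNL_ne_nil (t : List Char) : pvSplitNL t ≠ [] := by
  cases t with
  | nil => simp [pvSplitNL]
  | cons c r =>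
    by_cases h : c = '\n'
    · subst h; simp [pvSplitNL]
    · simp [pvSplitNL, h]; rcases pvSplitNL r with _ | ⟨l, ls⟩ <;> simp

lemma pvSplitNL_cons_ne {c : Char} (r : List Char) (h : c ≠ '\n') :
    pvSplitNL (c :: r) = pvConsH [c] (pvSplitNL r) := by
  simp only [pvSplitNL, h]
  rcases pvSplitNL r with _ | ⟨l, ls⟩ <;> simp [pvConsH]

lemma pvConsH_append (p q : List Char) (L : List (List Char)) :
    pvConsH p (pvConsH q L) = pvConsH (p ++ q) L := by
  rcases L with _ | ⟨x, xs⟩ <;> simp [pvConsH]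

lemma splitOn_go_spec : ∀ (fuel : Nat) (l cur : List Char) (acc : List (List Char)),
    l.length < fuel →
    PySem.Chars.splitOn.go ['\n'] fuel l cur acc =
      acc.reverse ++ pvConsH cur.reverse (pvSplitNL l) := by
  intro fuel
  induction fuel with
  | zero => intro l cur acc h; omega
  | succ f ih =>
    intro l cur acc h
    cases l with
    | nil =>
      rw [PySem.Chars.splitOn.go]
      all_goals first | omega | simp [pvSplitNL, pvConsH]
    | cons c t =>
      rw [PySem.Chars.splitOn.go]
      by_cases hc : c = '\n'
      · subst hc
        have hpre : ['\n'].isPrefixOf ('\n' :: t) = true := by simp [List.isPrefixOf]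
        rw [if_pos hpre]
        rw [ih _ _ _ (by simpa using Nat.lt_of_succ_lt_succ h)]
        simp only [pvSplitNL]
        rcases ht : pvSplitNL t with _ | ⟨x, xs⟩
        · exact absurd ht (pvSplitNL_ne_nil t)
        · simp [pvConsH, ht]
      · have hpre : ['\n'].isPrefixOf (c :: t) = false := by
          simp [List.isPrefixOf]
          exact fun h => hc h.symm
        rw [if_neg (by simp [hpre])]
        rw [ih _ _ _ (by simpa using Nat.lt_of_succ_lt_succ h)]
        rw [pvSplitNL_cons_ne t hc, pvConsH_append]
        simp

lemma splitOn_eq (t : List Char) : PySem.Chars.splitOn t ['\n'] = pvSplitNL t := by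
  rw [PySem.Chars.splitOn, splitOn_go_spec _ _ _ _ (by omega)]
  rcases ht : pvSplitNL t with _ | ⟨x, xs⟩
  · exact absurd ht (pvSplitNL_ne_nil t)
  · simp [pvConsH]

-- pvSplitNL structure lemmas
lemma pvSplitNL_no_nl {s : List Char} (h : '\n' ∉ s) : pvSplitNL s = [s] := by
  induction s with
  | nil => rfl
  | cons c r ih =>
    have hc : c ≠ '\n' := fun hc => h (by simp [hc])
    rw [pvSplitNL_cons_ne _ hc, ih (fun hr => h (by simp [hr]))]
    simp [pvConsH]

lemma pvSplitNL_append {a b : List Char} (h : '\n' ∉ a) :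
    pvSplitNL (a ++ '\n' :: b) = a :: pvSplitNL b := by
  induction a with
  | nil => simp [pvSplitNL]
  | cons c a' ih =>
    have hc : c ≠ '\n' := fun hc => h (by simp [hc])
    rw [List.cons_append, pvSplitNL_cons_ne _ hc, ih (fun ha => h (by simp [ha]))]
    simp [pvConsH]

lemma join_pvSplitNL (t : List Char) : PySem.Chars.join ['\n'] (pvSplitNL t) = t := by
  induction t with
  | nil => rfl
  | cons c r ih =>
    by_cases hc : c = '\n'
    · subst hc
      simp only [pvSplitNL]
      rcases hr : pvSplitNL r with _ | ⟨x, xs⟩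
      · exact absurd hr (pvSplitNL_ne_nil r)
      · rw [PySem.Chars.join_cons_cons, ← hr, ih]
        rfl
    · rw [pvSplitNL_cons_ne _ hc]
      rcases hr : pvSplitNL r with _ | ⟨x, xs⟩
      · exact absurd hr (pvSplitNL_ne_nil r)
      · rw [hr] at ih
        rcases xs with _ | ⟨y, ys⟩
        · rw [PySem.Chars.join_singleton] at ih
          simp [pvConsH, PySem.Chars.join_singleton, ih]
        · simp only [pvConsH]
          rw [PySem.Chars.join_cons_cons] at ih ⊢
          simp only [List.append_assoc, List.singleton_append, List.cons_append] at ih ⊢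
          rw [ih]
          simp

-- the main loop invariant: A's walk computes exactly what B's scan of the split computes
lemma pyA_loop_spec : ∀ (fuel : Nat) (t : List Char) (i : Nat),
    i ≤ t.length → t.length + 1 - i ≤ fuel →
    pyA_loop t i fuel =
      (match pyB_find (pvSplitNL (t.drop i)) with
       | none => t
       | some rest => PySem.Chars.join ['\n'] rest) := by
  intro fuel
  induction fuel with
  | zero => intro t i h1 h2; omega
  | succ f ih =>
    intro t i h1 h2
    rw [pyA_loop]
    simp only
    rw [PySem.Chars.findFrom_natCast t ['\n'] i h1]
    by_cases hfind : PySem.Chars.find (t.drop i) ['\n'] = -1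
    · rw [if_pos hfind, if_pos (by decide : (-1 : Int) < 0)]
      have hno : '\n' ∉ t.drop i := by
        intro hmem
        exact (PySem.Chars.find_eq_neg_one_iff _ _).mp hfind
          ((List.singleton_infix_iff _ _).mpr hmem)
      rw [pvSplitNL_no_nl hno]
      rfl
    · rw [if_neg hfind]
      have hge : 0 ≤ PySem.Chars.find (t.drop i) ['\n'] := by
        have := PySem.Chars.neg_one_le_find (t.drop i) ['\n']
        omega
      obtain ⟨hpre, hmin⟩ := PySem.Chars.find_spec hge
      set f0 := (PySem.Chars.find (t.drop i) ['\n']).toNat with hf0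
      have hfeq : PySem.Chars.find (t.drop i) ['\n'] = (f0 : Int) := (Int.toNat_of_nonneg hge).symm
      obtain ⟨u, hu⟩ : ∃ u, (t.drop i).drop f0 = '\n' :: u := by
        rcases hpre with ⟨v, hv⟩
        exact ⟨v, hv.symm⟩
      have hf0lt : f0 < (t.drop i).length := by
        have : (t.drop i).drop f0 ≠ [] := by rw [hu]; simp
        by_contra hle
        exact this (List.drop_eq_nil_of_le (by omega))
      have hu' : u = (t.drop i).drop (f0 + 1) := by
        have := congrArg List.tail hu
        simpa [List.tail_drop] using this.symm
      have hdecomp : t.drop i = (t.drop i).take f0 ++ '\n' :: (t.drop i).drop (f0 + 1) := by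
        conv_lhs => rw [← List.take_append_drop f0 (t.drop i)]
        rw [hu, hu']
      have hnotake : '\n' ∉ (t.drop i).take f0 := by
        intro hmem
        obtain ⟨k, hk, hgetk⟩ := List.getElem_of_mem hmem
        have hklt : k < f0 := by
          have := List.length_take_le f0 (t.drop i)
          omega
        have hks : k < (t.drop i).length := by omega
        apply hmin k hklt
        rw [List.drop_eq_getElem_cons hks]
        have : (t.drop i)[k] = '\n' := by
          rw [List.getElem_take] at hgetk
          exact hgetk
        rw [this]
        exact ⟨_, rfl⟩
      have hjpos : ¬ ((i : Int) + PySem.Chars.find (t.drop i) ['\n'] < 0) := by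
        rw [hfeq]; omega
      rw [if_neg hjpos]
      have hslice : PySem.Chars.slice t (some (i : Int)) (some ((i : Int) + PySem.Chars.find (t.drop i) ['\n'])) =
          (t.drop i).take f0 := by
        rw [PySem.Chars.slice_eq_listSlice, hfeq]
        rw [show ((i : Int) + (f0 : Int)) = ((i + f0 : Nat) : Int) by push_cast; ring]
        rw [PySem.List.slice_natCast]
        have he : i + f0 - i = f0 := by omega
        rw [he]
      rw [hslice]
      have hsplit : pvSplitNL (t.drop i) = (t.drop i).take f0 :: pvSplitNL ((t.drop i).drop (f0 + 1)) := by
        conv_lhs => rw [hdecomp]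
        exact pvSplitNL_append hnotake
      by_cases hblank : PySem.Chars.strip ((t.drop i).take f0) = []
      · rw [if_neg (by simpa using hblank)]
        have htoNat : ((i : Int) + PySem.Chars.find (t.drop i) ['\n']).toNat = i + f0 := by
          rw [hfeq]; omega
        rw [htoNat]
        have hi' : i + f0 + 1 ≤ t.length := by
          have hl2 : (t.drop i).length = t.length - i := by simp
          omega
        rw [ih t (i + f0 + 1) hi' (by omega)]
        have hdd : t.drop (i + f0 + 1) = (t.drop i).drop (f0 + 1) := by
          rw [List.drop_drop]
          ring_nf
        rw [hdd, hsplit]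
        rcases hrest : pvSplitNL ((t.drop i).drop (f0 + 1)) with _ | ⟨x, xs⟩
        · exact absurd hrest (pvSplitNL_ne_nil _)
        · rw [show pyB_find ((t.drop i).take f0 :: x :: xs) = pyB_find (x :: xs) from by
            simp [pyB_find, hblank]]
      · rw [if_pos (by simpa using hblank)]
        have hfrom : PySem.Chars.slice t (some (i : Int)) none = t.drop i := by
          rw [PySem.Chars.slice_eq_listSlice]
          exact PySem.List.slice_from_natCast t i
        rw [hfrom, hsplit]
        rcases hrest : pvSplitNL ((t.drop i).drop (f0 + 1)) with _ | ⟨x, xs⟩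
        · exact absurd hrest (pvSplitNL_ne_nil _)
        · rw [show pyB_find ((t.drop i).take f0 :: x :: xs) =
              some ((t.drop i).take f0 :: x :: xs) from by
            simp [pyB_find, hblank]]
          show t.drop i = PySem.Chars.join ['\n'] ((t.drop i).take f0 :: x :: xs)
          rw [← hrest, ← hsplit, join_pvSplitNL]


-- ===== VERDICT (by name: the statement is the Claim_ definition above) =====
theorem strip_leading_blank_lines_py_spec : Claim_equal_strip_leading_blank_lines_py := by
  intro text _
  show strip_leading_blank_lines_py text = strip_leading_blank_lines_py_alt text
  simp only [strip_leading_blank_lines_py, strip_leading_blank_lines_py_alt, splitOn_eq]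
  rw [pyA_loop_spec ((normalize_newlines_py text).toList.length + 1)
    (normalize_newlines_py text).toList 0 (by omega) (by omega)]
  rw [List.drop_zero]
  rcases h : pyB_find (pvSplitNL (normalize_newlines_py text).toList) with _ | rest <;> simp [h]
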